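-- pv_equiv track=rewrite | github.com/mikehung0714/godot-project-report | report.py | split_object_variants
-- ===== SOURCE A (Python) =====
-- from typing import Dict, Iterable, List, Optional, Set, Tuple
--
-- def split_object_variants(s: str) -> List[str]:
--     out: List[str] = []
--     i = 0
--     while True:
--         start = s.find("Object(", i)
--         if start < 0:
--             break
--         depth = 0
--         j = start
--         while j < len(s):
--             ch = s[j]
--             if ch == "(":
--                 depth += 1
--             elif ch == ")":
--                 depth -= 1
--                 if depth == 0:
--                     out.append(s[start : j + 1])
--                     i = j + 1
--                     break
--             j += 1
--         else:
--             break
--     return out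
-- ===== SOURCE B (Python) =====
-- from typing import List
--
-- def split_object_variants(s: str) -> List[str]:
--     out: List[str] = []
--     start = -1   # -1 = searching; >=0 = start index of the region being captured
--     depth = 0
--     for i in range(len(s)):
--         if start < 0:
--             if s.startswith("Object(", i):
--                 start = i
--                 depth = 0
--         else:
--             ch = s[i]
--             if ch == "(":
--                 depth += 1
--             elif ch == ")":
--                 depth -= 1
--                 if depth == 0:
--                     out.append(s[start : i + 1])
--                     start = -1
--     return out
-- ===== Notes on version B (the rewrite author's own statement) =====
-- stated objective: simpler
-- what changed: Replaces A's nested loops (outer while-True with str.find plus an inner balancing scan with break/else) with one flat for-loop over all indices carrying explicit state (start marker, depth counter); str.find and the inner loop disappear.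
import Mathlib
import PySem

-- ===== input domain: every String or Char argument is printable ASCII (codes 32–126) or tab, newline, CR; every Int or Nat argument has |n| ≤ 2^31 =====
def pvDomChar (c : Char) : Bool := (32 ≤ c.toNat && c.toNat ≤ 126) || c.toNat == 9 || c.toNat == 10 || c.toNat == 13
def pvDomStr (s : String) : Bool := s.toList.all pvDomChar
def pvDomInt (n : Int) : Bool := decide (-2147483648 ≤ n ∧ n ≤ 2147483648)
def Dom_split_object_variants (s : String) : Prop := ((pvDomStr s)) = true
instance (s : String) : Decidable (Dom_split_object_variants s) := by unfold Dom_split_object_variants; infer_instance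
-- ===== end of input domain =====

-- B rewrites A's nested loops (str.find restart + inner balancing scan) as one flat
-- left-to-right pass with explicit state (start marker, depth counter); equivalence is exact.

-- the literal "Object("
def pvPat : List Char := ['O', 'b', 'j', 'e', 'c', 't', '(']

-- ===== PORT A =====
-- inner 'while j < len(s)' loop of A: returns the index j of the ')' that brings depth
-- to 0 (where A appends), or none if the scan falls off the end (Python's 'else: break').
def pvInner (cs : List Char) (j : Nat) (depth : Int) : Option Nat :=
  if h : j < cs.length then
    let ch := cs[j]
    if ch = '(' then pvInner cs (j + 1) (depth + 1)
    else if ch = ')' then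
      if depth - 1 = 0 then some j else pvInner cs (j + 1) (depth - 1)
    else pvInner cs (j + 1) depth
  else none
termination_by cs.length - j

-- outer 'while True' loop of A; fuel is only a termination guard (length + 1 always
-- suffices since i strictly increases between iterations, proved in the equivalence).
def pvOuter (cs : List Char) (fuel : Nat) (i : Nat) (out : List String) : List String :=
  match fuel with
  | 0 => out
  | fuel' + 1 =>
    let start := PySem.Chars.findFrom cs pvPat (i : Int) none   -- s.find("Object(", i)
    if start < 0 then out
    else
      match pvInner cs start.toNat 0 with
      | none => out
      | some j =>
          pvOuter cs fuel' (j + 1)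
            (out ++ [String.ofList (PySem.List.slice cs (some start) (some ((j : Int) + 1)))])

def split_object_variants (s : String) : List String :=
  pvOuter s.toList (s.toList.length + 1) 0 []

-- ===== PORT B =====
-- the single flat 'for i in range(len(s))' loop of B: start < 0 means searching,
-- start ≥ 0 means capturing with the current paren depth.
-- s.startswith("Object(", i) with 0 ≤ i ≤ len(s) is exactly pvPat.isPrefixOf (cs.drop i).
def pvScan (cs : List Char) (i : Nat) (start : Int) (depth : Int) (out : List String) :
    List String :=
  if h : i < cs.length then
    if start < 0 then
      if pvPat.isPrefixOf (cs.drop i) then pvScan cs (i + 1) (i : Int) 0 out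
      else pvScan cs (i + 1) start depth out
    else
      let ch := cs[i]
      if ch = '(' then pvScan cs (i + 1) start (depth + 1) out
      else if ch = ')' then
        if depth - 1 = 0 then
          pvScan cs (i + 1) (-1) (depth - 1)
            (out ++ [String.ofList (PySem.List.slice cs (some start) (some ((i : Int) + 1)))])
        else pvScan cs (i + 1) start (depth - 1) out
      else pvScan cs (i + 1) start depth out
  else out
termination_by cs.length - i

def split_object_variants_alt (s : String) : List String :=
  pvScan s.toList 0 (-1) 0 []

-- ===== PRECONDITION & SPEC =====
def Spec_split_object_variants (s : String) (out : List String) : Prop := out = split_object_variants_alt s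
instance (s : String) (out : List String) : Decidable (Spec_split_object_variants s out) := by unfold Spec_split_object_variants; infer_instance

-- ===== CLAIM (what is proved, stated in full; the proofs are below) =====
def Claim_equal_split_object_variants : Prop := ∀ (s : String), Dom_split_object_variants s → Spec_split_object_variants s (split_object_variants s)

-- ===== LEMMAS AND PROOFS =====

theorem pvInner_ge (cs : List Char) (j : Nat) (d : Int) (jc : Nat) :
    pvInner cs j d = some jc → j ≤ jc := by
  fun_induction pvInner cs j d with
  | case1 j d h ch h1 ih => exact fun hh => le_trans (by omega) (ih hh)
  | case2 j d h ch h1 h2 h3 => intro hh; simp at hh; omega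
  | case3 j d h ch h1 h2 h3 ih => exact fun hh => le_trans (by omega) (ih hh)
  | case4 j d h ch h1 h2 ih => exact fun hh => le_trans (by omega) (ih hh)
  | case5 j d h => intro hh; simp at hh

theorem pvInner_lt (cs : List Char) (j : Nat) (d : Int) (jc : Nat) :
    pvInner cs j d = some jc → jc < cs.length := by
  fun_induction pvInner cs j d with
  | case1 j d h ch h1 ih => exact ih
  | case2 j d h ch h1 h2 h3 => intro hh; simp at hh; omega
  | case3 j d h ch h1 h2 h3 ih => exact ih
  | case4 j d h ch h1 h2 ih => exact ih
  | case5 j d h => intro hh; simp at hh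

-- capture phase: B's scan in capture mode follows A's inner scan exactly
theorem pvScan_capture (cs : List Char) (j : Nat) (st : Int) (d : Int) (out : List String)
    (hst : 0 ≤ st) :
    pvScan cs j st d out =
      match pvInner cs j d with
      | some jc =>
          pvScan cs (jc + 1) (-1) 0
            (out ++ [String.ofList (PySem.List.slice cs (some st) (some ((jc : Int) + 1)))])
      | none => out := by
  fun_induction pvScan cs j st d out with
  | case1 i st d out h hlt hpre ih => omega
  | case2 i st d out h hlt hpre ih => omega
  | case3 i st d out h hlt ch hpar ih =>
      have h1 : cs[i] = '(' := hpar
      rw [ih hst]; conv_rhs => rw [pvInner]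
      simp only [dif_pos h, h1, if_pos]
  | case4 i st d out h hlt ch hpar hcl hd =>
      have h1 : ¬ cs[i] = '(' := hpar
      have h2 : cs[i] = ')' := hcl
      conv_rhs => rw [pvInner]
      simp only [dif_pos h, h2, hd, if_pos]
      simp
  | case5 i st d out h hlt ch hpar hcl hd ih =>
      have h1 : ¬ cs[i] = '(' := hpar
      have h2 : cs[i] = ')' := hcl
      rw [ih hst]; conv_rhs => rw [pvInner]
      simp only [dif_pos h, h2, hd, if_pos]
      simp
  | case6 i st d out h hlt ch hpar hcl ih =>
      have h1 : ¬ cs[i] = '(' := hpar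
      have h2 : ¬ cs[i] = ')' := hcl
      rw [ih hst]; conv_rhs => rw [pvInner]
      simp only [dif_pos h, h1, h2, if_neg, not_false_iff]
  | case7 i st d out h =>
      rw [pvInner]; simp only [dif_neg h]

-- prefix of a later drop is an infix of an earlier drop
theorem pv_infix_of_prefix_drop (cs sub : List Char) (k m : Nat) (hkm : k ≤ m)
    (h : sub <+: cs.drop m) : sub <:+: cs.drop k := by
  have hdd : cs.drop m = (cs.drop k).drop (m - k) := by
    rw [List.drop_drop]; congr 1; omega
  rw [hdd] at h
  exact h.isInfix.trans (List.drop_suffix _ _).isInfix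

theorem pv_find_eq_of_prefix (cs : List Char) (i : Nat) (hi : i ≤ cs.length)
    (h : pvPat.isPrefixOf (cs.drop i)) :
    PySem.Chars.findFrom cs pvPat (i : Int) none = (i : Int) := by
  have hpre : pvPat <+: cs.drop i := List.isPrefixOf_iff_prefix.mp h
  have hne : PySem.Chars.findFrom cs pvPat (i : Int) none ≠ -1 := by
    rw [ne_eq, PySem.Chars.findFrom_natCast_eq_neg_one_iff cs pvPat i hi]
    simp only [not_not]
    exact hpre.isInfix
  obtain ⟨h1, h2, h3⟩ := PySem.Chars.findFrom_natCast_spec cs pvPat i hi hne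
  by_cases hgt : i < (PySem.Chars.findFrom cs pvPat (i : Int) none).toNat
  · exact absurd hpre (h3 i le_rfl hgt)
  · omega

theorem pv_find_succ (cs : List Char) (i : Nat) (hi : i < cs.length)
    (h : ¬ pvPat.isPrefixOf (cs.drop i)) :
    PySem.Chars.findFrom cs pvPat (((i + 1 : Nat)) : Int) none =
      PySem.Chars.findFrom cs pvPat (i : Int) none := by
  have hpre : ¬ pvPat <+: cs.drop i := fun hp => h (List.isPrefixOf_iff_prefix.mpr hp)
  have hi' : i + 1 ≤ cs.length := hi
  have hii : i ≤ cs.length := le_of_lt hi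
  by_cases hneg : PySem.Chars.findFrom cs pvPat (i : Int) none = -1
  · rw [hneg, PySem.Chars.findFrom_natCast_eq_neg_one_iff cs pvPat (i+1) hi']
    rw [PySem.Chars.findFrom_natCast_eq_neg_one_iff cs pvPat i hii] at hneg
    intro hinf
    apply hneg
    have hd : List.drop (i+1) cs = (List.drop i cs).drop 1 := by
      rw [List.drop_drop]
    rw [hd] at hinf
    exact hinf.trans (List.drop_suffix 1 (List.drop i cs)).isInfix
  · obtain ⟨h1, h2, h3⟩ := PySem.Chars.findFrom_natCast_spec cs pvPat i hii hneg
    set r := PySem.Chars.findFrom cs pvPat (i : Int) none with hr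
    have hri : i ≠ r.toNat := by
      intro he; exact hpre (he ▸ h2)
    have hir : i + 1 ≤ r.toNat := by omega
    have hne2 : PySem.Chars.findFrom cs pvPat ((i+1 : Nat) : Int) none ≠ -1 := by
      rw [ne_eq, PySem.Chars.findFrom_natCast_eq_neg_one_iff cs pvPat (i+1) hi']
      simp only [not_not]
      exact pv_infix_of_prefix_drop cs pvPat (i+1) r.toNat hir h2
    obtain ⟨g1, g2, g3⟩ := PySem.Chars.findFrom_natCast_spec cs pvPat (i+1) hi' hne2
    set r2 := PySem.Chars.findFrom cs pvPat ((i+1 : Nat) : Int) none with hr2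
    have : r2.toNat = r.toNat := by
      by_cases hlt : r2.toNat < r.toNat
      · exact absurd g2 (h3 r2.toNat (by omega) hlt)
      · by_cases hlt2 : r.toNat < r2.toNat
        · exact absurd h2 (g3 r.toNat hir hlt2)
        · omega
    omega

theorem pv_find_len (cs : List Char) :
    PySem.Chars.findFrom cs pvPat ((cs.length : Nat) : Int) none = -1 := by
  rw [PySem.Chars.findFrom_natCast_eq_neg_one_iff cs pvPat cs.length le_rfl]
  simp [List.drop_length, pvPat]

-- search phase: B's scan in search mode skips to the next occurrence found by str.find
theorem pvScan_search (cs : List Char) : ∀ n i, n = cs.length - i → i ≤ cs.length →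
    ∀ out : List String,
    pvScan cs i (-1) 0 out =
      (if PySem.Chars.findFrom cs pvPat (i : Int) none < 0 then out
       else pvScan cs ((PySem.Chars.findFrom cs pvPat (i : Int) none).toNat + 1)
              (PySem.Chars.findFrom cs pvPat (i : Int) none) 0 out) := by
  intro n
  induction n with
  | zero =>
      intro i hn hi out
      have hie : i = cs.length := by omega
      subst hie
      rw [pvScan, pv_find_len]
      simp
  | succ n ih =>
      intro i hn hi out
      have hilt : i < cs.length := by omega
      by_cases hp : pvPat.isPrefixOf (cs.drop i)
      · rw [pvScan]
        simp only [dif_pos hilt, if_pos (show (-1 : Int) < 0 by decide), if_pos hp]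
        rw [pv_find_eq_of_prefix cs i (le_of_lt hilt) hp]
        simp
      · rw [pvScan]
        simp only [dif_pos hilt, if_pos (show (-1 : Int) < 0 by decide), if_neg hp]
        rw [ih (i+1) (by omega) (by omega) out, pv_find_succ cs i hilt hp]

theorem pv_head_O (cs : List Char) (k : Nat) (hk : k < cs.length)
    (h : pvPat <+: cs.drop k) : cs[k] = 'O' := by
  obtain ⟨t, ht⟩ := h
  have h0 : (cs.drop k)[0]? = some 'O' := by rw [← ht]; rfl
  rw [List.getElem?_drop, Nat.add_zero, List.getElem?_eq_getElem hk] at h0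
  exact Option.some_injective _ h0

theorem pv_prefix_lt (cs : List Char) (k : Nat) (h : pvPat <+: cs.drop k) : k < cs.length := by
  obtain ⟨t, ht⟩ := h
  by_contra hle
  rw [List.drop_eq_nil_of_le (by omega)] at ht
  simp [pvPat] at ht

theorem pvOuter_eq_pvScan (cs : List Char) : ∀ (fuel i : Nat) (out : List String),
    i ≤ cs.length → cs.length + 1 - i ≤ fuel →
    pvOuter cs fuel i out = pvScan cs i (-1) 0 out := by
  intro fuel
  induction fuel with
  | zero => intro i out hi hf; omega
  | succ fuel ih =>
      intro i out hi hf
      rw [pvScan_search cs (cs.length - i) i rfl hi out, pvOuter]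
      by_cases hneg : PySem.Chars.findFrom cs pvPat (i : Int) none < 0
      · simp only [if_pos hneg]
      · simp only [if_neg hneg]
        have hne : PySem.Chars.findFrom cs pvPat (i : Int) none ≠ -1 := by omega
        obtain ⟨h1, h2, h3⟩ := PySem.Chars.findFrom_natCast_spec cs pvPat i hi hne
        set r := PySem.Chars.findFrom cs pvPat (i : Int) none with hr
        have hkl : r.toNat < cs.length := pv_prefix_lt cs r.toNat h2
        have hO : cs[r.toNat] = 'O' := pv_head_O cs r.toNat hkl h2
        have hinner : pvInner cs r.toNat 0 = pvInner cs (r.toNat + 1) 0 := by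
          rw [pvInner]
          simp only [dif_pos hkl, hO]
          simp
        rw [pvScan_capture cs (r.toNat + 1) r 0 out (by omega), ← hinner]
        cases hj : pvInner cs r.toNat 0 with
        | none => rfl
        | some jc =>
            have hjge : r.toNat ≤ jc := pvInner_ge cs r.toNat 0 jc hj
            have hjlt : jc < cs.length := pvInner_lt cs r.toNat 0 jc hj
            simp only []
            rw [ih (jc + 1) _ (by omega) (by omega)]
  
-- ===== VERDICT (by name: the statement is the Claim_ definition above) =====
theorem split_object_variants_spec : Claim_equal_split_object_variants := by
  intro s _
  unfold Spec_split_object_variants split_object_variants split_object_variants_alt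
  exact pvOuter_eq_pvScan s.toList (s.toList.length + 1) 0 [] (by omega) (by omega)
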